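-- pv_equiv track=rewrite | github.com/charan-1230/inlp-A3 | src/preprocessing/task1/tokenizer.py | tokenize_cipher_line
-- ===== SOURCE A (Python) =====
-- SPACE_TOKEN = "<SPACE>"
--
-- def tokenize_cipher_line(line: str) -> list[str] | None:
--     """
--     Convert a raw cipher string into a flat list of tokens.
--
--     '9'  → '<SPACE>'
--     Every pair of non-9 digits → a 2-char token e.g. '31', '18'
--
--     Returns None if the line cannot be cleanly tokenized (e.g. odd-length
--     segment that would leave a dangling digit).
--     """
--     tokens = []
--     i = 0
--     while i < len(line):
--         ch = line[i]
--         if ch == '9':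
--             tokens.append(SPACE_TOKEN)
--             i += 1
--         else:
--             # Expect exactly 2 digits
--             if i + 1 >= len(line):
--                 return None          # dangling single digit — skip line
--             pair = line[i:i + 2]
--             if '9' in pair:
--                 return None          # '9' inside a 2-digit window — invalid
--             tokens.append(pair)
--             i += 2
--     return tokens
-- ===== SOURCE B (Python) =====
-- SPACE_TOKEN = "<SPACE>"
--
-- def tokenize_cipher_line(line: str) -> list[str] | None:
--     # Split on '9': each '9' becomes one SPACE_TOKEN separator; each non-9
--     # segment must be even-length and is sliced into 2-char tokens.
--     tokens = []
--     for idx, seg in enumerate(line.split('9')):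
--         if idx:
--             tokens.append(SPACE_TOKEN)
--         if len(seg) % 2:
--             return None
--         for j in range(0, len(seg), 2):
--             tokens.append(seg[j:j + 2])
--     return tokens
-- ===== Notes on version B (the rewrite author's own statement) =====
-- stated objective: faster
-- what changed: Replaces the index-based while-loop state machine by splitting the line at the separator digit (one SPACE token per separator, done by str.split in one C-level pass) and slicing each segment, whose length must be even, into 2-char tokens.
import Mathlib
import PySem

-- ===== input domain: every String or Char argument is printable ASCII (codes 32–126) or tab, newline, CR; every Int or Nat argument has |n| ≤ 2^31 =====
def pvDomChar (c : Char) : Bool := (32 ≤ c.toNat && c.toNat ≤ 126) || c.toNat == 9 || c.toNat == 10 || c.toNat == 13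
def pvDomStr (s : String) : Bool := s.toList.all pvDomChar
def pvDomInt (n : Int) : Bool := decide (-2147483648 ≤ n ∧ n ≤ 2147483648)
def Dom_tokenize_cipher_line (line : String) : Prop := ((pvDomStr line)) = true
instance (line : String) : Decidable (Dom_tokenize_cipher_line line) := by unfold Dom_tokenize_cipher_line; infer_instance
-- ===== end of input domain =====

-- B is an idiomatic re-decomposition: split the line on '9' and slice each segment; same return value as A everywhere.

-- ===== PORT A =====
-- A's while-loop over the index i, consuming one char ('9') or two chars (a pair) per step,
-- rendered as the obvious structural recursion over the remaining characters with the tokens accumulator.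
def tokenizeA_go : List Char → List String → Option (List String)
  | [], acc => some acc
  | c :: rest, acc =>
    if c = '9' then tokenizeA_go rest (acc ++ ["<SPACE>"])
    else
      match rest with
      | [] => none                        -- dangling single digit
      | c2 :: rest2 =>
        if c = '9' ∨ c2 = '9' then none   -- '9' inside the 2-digit window
        else tokenizeA_go rest2 (acc ++ [String.mk [c, c2]])

def tokenize_cipher_line (line : String) : Option (List String) :=
  tokenizeA_go line.toList []

-- ===== PORT B =====
-- exact port of Python str.split('9') on the character list ("".split('9') = [''])
def splitNine : List Char → List (List Char)
  | [] => [[]]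
  | c :: cs =>
    if c = '9' then [] :: splitNine cs
    else
      match splitNine cs with
      | s :: ss => (c :: s) :: ss
      | [] => [[c]]   -- unreachable: splitNine never returns []

-- the inner loop: for j in range(0, len(seg), 2): tokens.append(seg[j:j+2])
def segPairs : List Char → List String
  | c1 :: c2 :: rest => String.mk [c1, c2] :: segPairs rest
  | _ => []

-- the outer for-loop over enumerate(line.split('9')): `first` tracks idx = 0
def tokenizeB_go : List (List Char) → Bool → List String → Option (List String)
  | [], _, acc => some acc
  | seg :: rest, first, acc =>
    let acc := if first then acc else acc ++ ["<SPACE>"]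
    if seg.length % 2 = 1 then none
    else tokenizeB_go rest false (acc ++ segPairs seg)

def tokenize_cipher_line_alt (line : String) : Option (List String) :=
  tokenizeB_go (splitNine line.toList) true []

-- ===== PRECONDITION & SPEC =====
def Spec_tokenize_cipher_line (line : String) (out : Option (List String)) : Prop := out = tokenize_cipher_line_alt line
instance (line : String) (out : Option (List String)) : Decidable (Spec_tokenize_cipher_line line out) := by unfold Spec_tokenize_cipher_line; infer_instance

-- ===== CLAIM (what is proved, stated in full; the proofs are below) =====
def Claim_equal_tokenize_cipher_line : Prop := ∀ (line : String), Dom_tokenize_cipher_line line → Spec_tokenize_cipher_line line (tokenize_cipher_line line)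

-- ===== LEMMAS AND PROOFS =====

theorem splitNine_ne_nil (cs : List Char) : splitNine cs ≠ [] := by
  cases cs with
  | nil => simp [splitNine]
  | cons c cs =>
    simp only [splitNine]
    split
    · simp
    · cases h : splitNine cs <;> simp

-- a non-first segment list behaves like a first one after emitting one SPACE
theorem tokenizeB_go_false (s : List Char) (ss : List (List Char)) (acc : List String) :
    tokenizeB_go (s :: ss) false acc = tokenizeB_go (s :: ss) true (acc ++ ["<SPACE>"]) := by
  simp [tokenizeB_go]

theorem tokenize_main (cs : List Char) (acc : List String) :
    tokenizeA_go cs acc = tokenizeB_go (splitNine cs) true acc := by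
  fun_induction tokenizeA_go cs acc with
  | case1 acc => simp [splitNine, tokenizeB_go, segPairs]
  | case2 rest acc ih =>
    -- c = '9'
    rw [ih]
    simp only [splitNine, if_pos rfl]
    cases hs : splitNine rest with
    | nil => exact absurd hs (splitNine_ne_nil rest)
    | cons s ss =>
      simp only [if_true]
      rw [show tokenizeB_go ([] :: s :: ss) true acc
            = tokenizeB_go (s :: ss) false acc from by simp [tokenizeB_go, segPairs],
          tokenizeB_go_false]
  | case3 c acc h =>
    -- c ≠ '9', rest = []
    simp [splitNine, h, tokenizeB_go]
  | case4 c acc h c2 rest2 h2 =>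
    -- c ≠ '9', pair contains '9' (so c2 = '9')
    have hc2 : c2 = '9' := by tauto
    subst hc2
    simp [splitNine, h, tokenizeB_go]
  | case5 c acc h c2 rest2 h2 ih =>
    -- c ≠ '9', c2 ≠ '9': consume the pair
    have hc2 : ¬ c2 = '9' := by tauto
    rw [ih]
    simp only [splitNine, if_neg h, if_neg hc2]
    cases hs : splitNine rest2 with
    | nil => exact absurd hs (splitNine_ne_nil rest2)
    | cons s ss =>
      simp only [tokenizeB_go, segPairs, List.length_cons]
      have hmod : (s.length + 1 + 1) % 2 = s.length % 2 := by omega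
      rw [hmod]
      split
      · rfl
      · simp

-- ===== VERDICT (by name: the statement is the Claim_ definition above) =====
theorem tokenize_cipher_line_spec : Claim_equal_tokenize_cipher_line := by
  intro line _
  unfold Spec_tokenize_cipher_line tokenize_cipher_line tokenize_cipher_line_alt
  exact tokenize_main _ _
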